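-- pv_equiv track=rewrite | github.com/bonomani/xymon | ci/deps/check-deps.py | resolve_packages
-- ===== SOURCE A (Python) =====
-- def resolve_packages(
--     items: list[str],
--     dep_map: dict,
--     family: str,
--     os_name: str,
--     pkgmgr: str,
-- ) -> list[str]:
--     resolved: list[str] = []
--     map_block = dep_map.get("map", {})
--     for item in items:
--         mapped = map_block.get(item, {})
--         if isinstance(mapped, dict):
--             family_entry = mapped.get(family, {})
--             if isinstance(family_entry, dict):
--                 os_entry = family_entry.get(os_name, {})
--                 if isinstance(os_entry, dict):
--                     pkg_list = os_entry.get(pkgmgr, [])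
--                     if pkg_list:
--                         resolved.extend(pkg_list)
--                         continue
--         resolved.append(item)
--     return resolved
-- ===== SOURCE B (Python) =====
-- def resolve_packages(
--     items: list[str],
--     dep_map: dict,
--     family: str,
--     os_name: str,
--     pkgmgr: str,
-- ) -> list[str]:
--     # Stage 1: index the dependency map once into a flat item -> packages table.
--     table = {}
--     map_block = dep_map.get("map", {})
--     if isinstance(map_block, dict):
--         for name, mapped in map_block.items():
--             if not isinstance(mapped, dict):
--                 continue
--             fe = mapped.get(family)
--             if not isinstance(fe, dict):
--                 continue
--             oe = fe.get(os_name)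
--             if not isinstance(oe, dict):
--                 continue
--             pl = oe.get(pkgmgr)
--             if pl:
--                 table[name] = pl
--     # Stage 2: resolve each item by one lookup, falling back to the item itself.
--     out: list[str] = []
--     for item in items:
--         out.extend(table.get(item, [item]))
--     return out
-- ===== Notes on version B (the rewrite author's own statement) =====
-- stated objective: alternative
-- what changed: B is a staged algorithm: one pass over the dependency map builds a flat item-to-packages table, then each item is resolved by a single table lookup with fallback, instead of A's per-item nested-dict walk with isinstance guards; Pre_ only excludes Lean association lists whose 'map' block has duplicate keys, which no Python dict can represent.
import Mathlib
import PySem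

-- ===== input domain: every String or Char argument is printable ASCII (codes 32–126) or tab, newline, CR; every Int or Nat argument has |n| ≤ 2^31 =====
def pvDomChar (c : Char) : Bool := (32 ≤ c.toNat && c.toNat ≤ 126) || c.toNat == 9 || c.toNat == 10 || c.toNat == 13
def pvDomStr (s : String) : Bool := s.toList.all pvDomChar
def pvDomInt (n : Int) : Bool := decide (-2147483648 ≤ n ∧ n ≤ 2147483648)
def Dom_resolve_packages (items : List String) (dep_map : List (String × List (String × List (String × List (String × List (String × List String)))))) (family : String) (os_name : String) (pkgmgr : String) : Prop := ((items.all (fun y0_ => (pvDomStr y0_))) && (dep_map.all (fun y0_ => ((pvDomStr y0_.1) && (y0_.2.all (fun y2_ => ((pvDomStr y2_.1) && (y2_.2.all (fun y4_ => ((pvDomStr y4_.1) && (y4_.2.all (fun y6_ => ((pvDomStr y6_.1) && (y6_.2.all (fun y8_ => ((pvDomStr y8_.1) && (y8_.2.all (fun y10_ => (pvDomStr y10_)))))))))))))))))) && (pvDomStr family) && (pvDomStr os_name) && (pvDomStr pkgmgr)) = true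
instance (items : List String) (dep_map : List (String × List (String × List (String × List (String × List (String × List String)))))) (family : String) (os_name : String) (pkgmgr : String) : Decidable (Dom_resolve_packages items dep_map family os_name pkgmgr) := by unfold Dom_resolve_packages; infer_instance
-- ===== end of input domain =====

-- B stages the work: one pass over the dependency map builds a flat item->packages table, then each item is one lookup (objective: alternative).

-- ===== PORT A =====
def resolve_packages (items : List String) (dep_map : List (String × List (String × List (String × List (String × List (String × List String)))))) (family : String) (os_name : String) (pkgmgr : String) : List String :=
  let map_block := (PySem.Dict.mk dep_map).getD "map" []
  items.foldl (fun resolved item =>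
    let mapped := (PySem.Dict.mk map_block).getD item []
    -- isinstance(mapped, dict): always true on this typed domain (same at each level below)
    let family_entry := (PySem.Dict.mk mapped).getD family []
    let os_entry := (PySem.Dict.mk family_entry).getD os_name []
    let pkg_list := (PySem.Dict.mk os_entry).getD pkgmgr []
    if pkg_list ≠ [] then resolved ++ pkg_list
    else resolved ++ [item]) []

-- ===== PORT B =====
-- inner chain of Source B's stage 1 for one map entry ('mapped.get(family)' etc.; isinstance guards are vacuous on this typed domain)
def pvInner (mapped : List (String × List (String × List (String × List String)))) (family : String) (os_name : String) (pkgmgr : String) : List String :=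
  let fe := (PySem.Dict.mk mapped).getD family []
  let oe := (PySem.Dict.mk fe).getD os_name []
  (PySem.Dict.mk oe).getD pkgmgr []

-- stage 1: table built once over the map block's entries
def pvTable (map_block : List (String × List (String × List (String × List (String × List String))))) (family : String) (os_name : String) (pkgmgr : String) : PySem.Dict String (List String) :=
  map_block.foldl (fun t nm =>
    let pl := pvInner nm.2 family os_name pkgmgr
    if pl ≠ [] then t.insert nm.1 pl else t) PySem.Dict.empty

def resolve_packages_alt (items : List String) (dep_map : List (String × List (String × List (String × List (String × List (String × List String)))))) (family : String) (os_name : String) (pkgmgr : String) : List String :=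
  let map_block := (PySem.Dict.mk dep_map).getD "map" []
  let table := pvTable map_block family os_name pkgmgr
  items.foldl (fun out item => out ++ table.getD item [item]) []

-- ===== PRECONDITION & SPEC =====
-- Pre_ excludes dependency maps whose "map" block carries duplicate keys (impossible for a real Python
-- dict): there B's build-table overwrite (last entry wins) and A's first-match lookup are both defensible.
def Pre_resolve_packages (items : List String) (dep_map : List (String × List (String × List (String × List (String × List (String × List String)))))) (family : String) (os_name : String) (pkgmgr : String) : Prop :=
  (((List.lookup "map" dep_map).getD []).map Prod.fst).Nodup
instance (items : List String) (dep_map : List (String × List (String × List (String × List (String × List (String × List String)))))) (family : String) (os_name : String) (pkgmgr : String) : Decidable (Pre_resolve_packages items dep_map family os_name pkgmgr) := by unfold Pre_resolve_packages; infer_instance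

def pvWitness_resolve_packages : List String × (List (String × List (String × List (String × List (String × List (String × List String)))))) × String × String × String :=
  (["a", "b"], [("map", [("a", [("f", [("o", [("p", ["x", "y"])])])])])], "f", "o", "p")

def Spec_resolve_packages (items : List String) (dep_map : List (String × List (String × List (String × List (String × List (String × List String)))))) (family : String) (os_name : String) (pkgmgr : String) (out : List String) : Prop := out = resolve_packages_alt items dep_map family os_name pkgmgr
instance (items : List String) (dep_map : List (String × List (String × List (String × List (String × List (String × List String)))))) (family : String) (os_name : String) (pkgmgr : String) (out : List String) : Decidable (Spec_resolve_packages items dep_map family os_name pkgmgr out) := by unfold Spec_resolve_packages; infer_instance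

-- ===== CLAIM (what is proved, stated in full; the proofs are below) =====
def Claim_equal_resolve_packages : Prop := ∀ (items : List String) (dep_map : List (String × List (String × List (String × List (String × List (String × List String)))))) (family : String) (os_name : String) (pkgmgr : String), Dom_resolve_packages items dep_map family os_name pkgmgr → Pre_resolve_packages items dep_map family os_name pkgmgr → Spec_resolve_packages items dep_map family os_name pkgmgr (resolve_packages items dep_map family os_name pkgmgr)

-- ===== LEMMAS AND PROOFS =====

-- List.lookup (used by Pre_) agrees with PySem.Dict's first-match get?
lemma pv_lookup_eq_get? (dep_map : List (String × List (String × List (String × List (String × List (String × List String)))))) :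
    List.lookup "map" dep_map = (PySem.Dict.mk dep_map).get? "map" := by
  induction dep_map with
  | nil => rfl
  | cons p rest ih =>
    obtain ⟨k, v⟩ := p
    rw [PySem.Dict.get?_mk_cons]
    by_cases h : k = "map"
    · subst h
      rw [List.lookup_cons_self, if_pos (show ("map" == "map") = true from rfl)]
    · have h1 : ("map" == k) = false := beq_eq_false_iff_ne.mpr (Ne.symm h)
      have h2 : (k == "map") = false := beq_eq_false_iff_ne.mpr h
      simp only [List.lookup, h1, h2, Bool.false_eq_true, if_false]
      exact ih

-- stage-1 invariant: what the table lookup returns, for a map block with distinct keys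
lemma pv_table_get? (family os_name pkgmgr : String) :
    ∀ (mb : List (String × List (String × List (String × List (String × List String)))))
      (t : PySem.Dict String (List String)) (x : String), (mb.map Prod.fst).Nodup →
      (mb.foldl (fun t nm =>
        let pl := pvInner nm.2 family os_name pkgmgr
        if pl ≠ [] then t.insert nm.1 pl else t) t).get? x =
      match (PySem.Dict.mk mb).get? x with
      | some m => if pvInner m family os_name pkgmgr ≠ [] then some (pvInner m family os_name pkgmgr) else t.get? x
      | none => t.get? x := by
  intro mb
  induction mb with
  | nil => intro t x _; rfl
  | cons p rest ih =>
    intro t x hnd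
    simp only [List.map_cons, List.nodup_cons] at hnd
    rw [List.foldl_cons, ih _ _ hnd.2, PySem.Dict.get?_mk_cons]
    by_cases hx : p.1 = x
    · subst hx
      have hrest : (PySem.Dict.mk rest).get? p.1 = none := by
        rw [PySem.Dict.get?_eq_none_iff_not_mem_keys]
        simpa using hnd.1
      simp only [hrest, BEq.rfl, if_true]
      by_cases hpl : pvInner p.2 family os_name pkgmgr ≠ []
      · simp [hpl, PySem.Dict.get?_insert_self]
      · simp [hpl]
    · have hbx : (p.1 == x) = false := by simpa using hx
      simp only [hbx, Bool.false_eq_true, if_false]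
      have hne : ∀ pl, (t.insert p.1 pl).get? x = t.get? x := by
        intro pl; rw [PySem.Dict.get?_insert]; simp [Ne.symm hx]
      by_cases hpl : pvInner p.2 family os_name pkgmgr ≠ []
      · cases hr : (PySem.Dict.mk rest).get? x <;> simp [hpl, hne]
      · simp [hpl]

-- per-item agreement: A's nested walk equals B's table lookup with fallback
lemma pv_item_eq (mb : List (String × List (String × List (String × List (String × List String)))))
    (family os_name pkgmgr x : String) (hnd : (mb.map Prod.fst).Nodup) :
    (pvTable mb family os_name pkgmgr).getD x [x] =
      (let pkg_list := pvInner ((PySem.Dict.mk mb).getD x []) family os_name pkgmgr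
       if pkg_list ≠ [] then pkg_list else [x]) := by
  rw [PySem.Dict.getD_eq_get?_getD]
  unfold pvTable
  rw [pv_table_get? family os_name pkgmgr mb PySem.Dict.empty x hnd]
  rw [PySem.Dict.getD_eq_get?_getD]
  cases hg : (PySem.Dict.mk mb).get? x with
  | none =>
    simp only [PySem.Dict.get?_empty, Option.getD_none]
    have : pvInner [] family os_name pkgmgr = [] := rfl
    simp [this]
  | some m =>
    simp only [Option.getD_some]
    by_cases hpl : pvInner m family os_name pkgmgr ≠ []
    · simp [hpl]
    · simp [hpl, PySem.Dict.get?_empty]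

-- both foldls agree step by step once the per-item values coincide
lemma pv_foldl_eq (mb : List (String × List (String × List (String × List (String × List String)))))
    (family os_name pkgmgr : String) (hnd : (mb.map Prod.fst).Nodup) :
    ∀ (items : List String) (acc : List String),
      items.foldl (fun resolved item =>
        let mapped := (PySem.Dict.mk mb).getD item []
        let family_entry := (PySem.Dict.mk mapped).getD family []
        let os_entry := (PySem.Dict.mk family_entry).getD os_name []
        let pkg_list := (PySem.Dict.mk os_entry).getD pkgmgr []
        if pkg_list ≠ [] then resolved ++ pkg_list
        else resolved ++ [item]) acc
      = items.foldl (fun out item => out ++ (pvTable mb family os_name pkgmgr).getD item [item]) acc := by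
  intro items
  induction items with
  | nil => intro acc; rfl
  | cons x xs ih =>
    intro acc
    simp only [List.foldl_cons]
    rw [ih]
    congr 1
    rw [pv_item_eq mb family os_name pkgmgr x hnd]
    by_cases hpl : (PySem.Dict.mk ((PySem.Dict.mk ((PySem.Dict.mk ((PySem.Dict.mk mb).getD x [])).getD family [])).getD os_name [])).getD pkgmgr [] = []
    · simp [pvInner, hpl]
    · simp [pvInner, hpl]

-- ===== VERDICT (by name: the statement is the Claim_ definition above) =====
theorem resolve_packages_spec : Claim_equal_resolve_packages := by
  intro items dep_map family os_name pkgmgr _ hpre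
  unfold Spec_resolve_packages resolve_packages resolve_packages_alt
  have hnd : ((((PySem.Dict.mk dep_map).getD "map" []).map Prod.fst).Nodup) := by
    unfold Pre_resolve_packages at hpre
    rwa [pv_lookup_eq_get?, ← PySem.Dict.getD_eq_get?_getD] at hpre
  exact pv_foldl_eq _ family os_name pkgmgr hnd items []
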